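-- pv_equiv track=rewrite | github.com/danjavv/DarkPools-A2A | Desktop/sl-compute/python_wrapper/compare_ge/compare_ge_wrapper.py | _create_binary_arithmetic_share
-- ===== SOURCE A (Python) =====
-- def _create_binary_arithmetic_share(value: int) -> dict:
--     """Convert an integer to binary arithmetic share format"""
--     if value < 0:
--         raise ValueError("Negative values not supported")
--     if value > 2**64 - 1:
--         raise ValueError("Value too large")
--
--     # Convert to binary representation
--     binary = format(value, '064b')  # 64-bit representation
--     return {
--         'value1': [int(bit) for bit in binary],
--         'value2': [int(bit) for bit in binary]
--     }
-- ===== SOURCE B (Python) =====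
-- def _create_binary_arithmetic_share(value: int) -> dict:
--     """Convert an integer to binary arithmetic share format"""
--     if value < 0:
--         raise ValueError("Negative values not supported")
--     if value > 2**64 - 1:
--         raise ValueError("Value too large")
--
--     # Extract the 64 bits arithmetically, MSB first
--     bits = [value // 2 ** i % 2 for i in range(63, -1, -1)]
--     return {
--         'value1': list(bits),
--         'value2': list(bits)
--     }
-- ===== Notes on version B (the rewrite author's own statement) =====
-- stated objective: idiomatic
-- what changed: Replaces the format-to-'064b'-string-then-parse-each-character pipeline by direct arithmetic bit extraction (value // 2**i % 2 for i = 63..0), building the bit list once and copying it for value1/value2.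
import Mathlib
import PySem

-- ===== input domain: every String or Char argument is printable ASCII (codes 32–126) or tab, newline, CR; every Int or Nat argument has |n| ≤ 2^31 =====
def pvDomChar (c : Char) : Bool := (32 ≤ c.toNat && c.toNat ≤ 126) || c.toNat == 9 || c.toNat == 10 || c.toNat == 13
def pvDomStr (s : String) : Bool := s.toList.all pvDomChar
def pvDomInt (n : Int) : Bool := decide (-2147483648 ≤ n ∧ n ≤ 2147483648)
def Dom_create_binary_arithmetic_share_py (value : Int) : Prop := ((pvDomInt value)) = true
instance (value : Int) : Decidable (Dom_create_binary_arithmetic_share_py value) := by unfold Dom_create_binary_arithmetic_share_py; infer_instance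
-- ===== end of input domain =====

-- B replaces A's format-to-'064b'-string-then-parse pipeline by direct arithmetic bit extraction (idiomatic; same guards, same result).

-- ===== PORT A =====
-- Hand port of format(value, '064b') as a List Char: 64 binary digits, MSB first.
-- Exact for 0 <= value < 2^64 (the only values that reach it in A, after the guards).
def pvToBin064 : Nat -> Int -> List Char
  | 0, _ => []
  | k+1, n => pvToBin064 k (PySem.Int.floordiv n 2) ++ [if PySem.Int.mod n 2 = 1 then '1' else '0']

def create_binary_arithmetic_share_py (value : Int) : List (String × List Int) :=
  if value < 0 then []          -- raise ValueError("Negative values not supported"): excluded by Pre_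
  else if value > 2^64 - 1 then []   -- raise ValueError("Value too large"): excluded by Pre_
  else
    let binary := pvToBin064 64 value
    -- int(bit) on a digit char '0'/'1' is its code minus 48 (exact there)
    [("value1", binary.map (fun c => ((c.toNat : Int) - 48))),
     ("value2", binary.map (fun c => ((c.toNat : Int) - 48)))]

-- ===== PORT B =====
def create_binary_arithmetic_share_py_alt (value : Int) : List (String × List Int) :=
  if value < 0 then []          -- raise ValueError: excluded by Pre_
  else if value > 2^64 - 1 then []   -- raise ValueError: excluded by Pre_
  else
    -- bits = [value // 2 ** i % 2 for i in range(63, -1, -1)]; i is 63..0 so 2**i = 2^i.toNat exactly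
    let bits := (PySem.List.pyRange 63 (-1) (-1)).map
      (fun i => PySem.Int.mod (PySem.Int.floordiv value (2 ^ i.toNat)) 2)
    [("value1", bits), ("value2", bits)]

-- ===== PRECONDITION & SPEC =====
-- Pre_ excludes exactly the inputs where A raises ValueError: negative values and values above 2^64 - 1.
def Pre_create_binary_arithmetic_share_py (value : Int) : Prop := 0 ≤ value ∧ value ≤ 2^64 - 1
instance (value : Int) : Decidable (Pre_create_binary_arithmetic_share_py value) := by unfold Pre_create_binary_arithmetic_share_py; infer_instance
def pvWitness_create_binary_arithmetic_share_py : Int := 5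
def Spec_create_binary_arithmetic_share_py (value : Int) (out : List (String × List Int)) : Prop := out = create_binary_arithmetic_share_py_alt value
instance (value : Int) (out : List (String × List Int)) : Decidable (Spec_create_binary_arithmetic_share_py value out) := by unfold Spec_create_binary_arithmetic_share_py; infer_instance

-- ===== CLAIM (what is proved, stated in full; the proofs are below) =====
def Claim_equal_create_binary_arithmetic_share_py : Prop := ∀ (value : Int), Dom_create_binary_arithmetic_share_py value → Pre_create_binary_arithmetic_share_py value → Spec_create_binary_arithmetic_share_py value (create_binary_arithmetic_share_py value)

-- ===== LEMMAS AND PROOFS =====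

lemma pv_fdiv_fdiv (n : Int) (i : Nat) :
    PySem.Int.floordiv (PySem.Int.floordiv n 2) (2 ^ i) = PySem.Int.floordiv n (2 ^ (i + 1)) := by
  rw [PySem.Int.floordiv_eq_ediv_of_pos (by positivity), PySem.Int.floordiv_eq_ediv_of_pos (by norm_num),
      PySem.Int.floordiv_eq_ediv_of_pos (by positivity)]
  rw [Int.ediv_ediv_of_nonneg (by norm_num)]
  ring_nf

lemma pv_bin_map (k : Nat) (n : Int) :
    (pvToBin064 k n).map (fun c => ((c.toNat : Int) - 48)) =
      (List.range k).reverse.map (fun i => PySem.Int.mod (PySem.Int.floordiv n (2 ^ i)) 2) := by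
  induction k generalizing n with
  | zero => simp [pvToBin064]
  | succ k ih =>
    have hmod : PySem.Int.mod n 2 = 0 ∨ PySem.Int.mod n 2 = 1 := by
      have h1 := PySem.Int.mod_nonneg n (b := 2) (by norm_num)
      have h2 := PySem.Int.mod_lt n (b := 2) (by norm_num)
      omega
    have hbit : ((if PySem.Int.mod n 2 = 1 then '1' else '0').toNat : Int) - 48 = PySem.Int.mod n 2 := by
      rcases hmod with h | h <;> rw [h] <;> decide
    have hrange : (List.range (k+1)).reverse = ((List.range k).reverse.map Nat.succ) ++ [0] := by
      rw [List.range_succ_eq_map]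
      simp
    rw [pvToBin064, List.map_append, ih, hrange, List.map_append, List.map_map]
    congr 1
    · refine List.map_congr_left ?_
      intro i _
      simp only [Function.comp]
      rw [pv_fdiv_fdiv]
    · simp only [List.map_cons, List.map_nil, hbit]
      congr 2
      rw [pow_zero, PySem.Int.floordiv_eq_ediv_of_pos (by norm_num), Int.ediv_one]

lemma pv_countdown : PySem.List.pyRange 63 (-1) (-1) = (List.range 64).reverse.map (Int.ofNat) := by
  decide

theorem create_binary_arithmetic_share_py_spec : Claim_equal_create_binary_arithmetic_share_py := by
  intro value hdom hpre
  obtain ⟨h0, h1⟩ := hpre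
  unfold Spec_create_binary_arithmetic_share_py create_binary_arithmetic_share_py create_binary_arithmetic_share_py_alt
  rw [if_neg (by omega), if_neg (by omega), if_neg (by omega), if_neg (by omega)]
  have hbits : (PySem.List.pyRange 63 (-1) (-1)).map
      (fun i => PySem.Int.mod (PySem.Int.floordiv value (2 ^ i.toNat)) 2) =
      (pvToBin064 64 value).map (fun c => ((c.toNat : Int) - 48)) := by
    rw [pv_bin_map, pv_countdown, List.map_map]
    refine List.map_congr_left ?_
    intro i _
    simp
  simp only [hbits]
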